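-- pv_equiv track=rewrite | github.com/python3isfun/learn_python_fall_2020 | class_fourteen/demo.py | update_wallet
-- ===== SOURCE A (Python) =====
-- def update_wallet(d, double_list):
--     for i in double_list:
--         if i in d:
--             d[i] = 2 * d[i]
--
--     for k, v in d.items():
--         if k not in double_list:
--             d[k] = d[k] - 3
--     return d
-- ===== SOURCE B (Python) =====
-- def update_wallet(d, double_list):
--     # Return-value equivalent to A (A mutates d in place; B builds a fresh dict).
--     counts = {}
--     for i in double_list:
--         counts[i] = counts.get(i, 0) + 1
--     return {k: v * 2 ** counts[k] if k in counts else v - 3 for k, v in d.items()}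
-- ===== Notes on version B (the rewrite author's own statement) =====
-- stated objective: faster
-- what changed: Replaces A's two shaped passes (a loop over double_list doubling matching keys, then a loop over the dict with an O(len(double_list)) 'k not in double_list' list scan per key) with a count table built once from double_list and a single dict-comprehension pass using v*2**count; B builds a fresh dict instead of mutating d in place, so the equivalence is about the return value.
import Mathlib
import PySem

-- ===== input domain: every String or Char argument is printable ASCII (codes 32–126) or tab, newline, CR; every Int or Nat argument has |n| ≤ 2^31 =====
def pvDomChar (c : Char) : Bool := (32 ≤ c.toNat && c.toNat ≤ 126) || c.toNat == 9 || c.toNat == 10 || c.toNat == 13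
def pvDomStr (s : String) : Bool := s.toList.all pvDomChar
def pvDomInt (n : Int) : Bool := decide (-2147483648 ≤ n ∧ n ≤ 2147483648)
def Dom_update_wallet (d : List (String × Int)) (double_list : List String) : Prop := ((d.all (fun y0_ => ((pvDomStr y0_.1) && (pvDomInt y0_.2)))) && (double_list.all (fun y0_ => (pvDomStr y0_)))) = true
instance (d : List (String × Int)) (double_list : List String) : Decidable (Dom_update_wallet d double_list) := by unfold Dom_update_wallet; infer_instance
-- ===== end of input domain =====

-- B builds a count table from double_list and rewrites the dict in one pass, instead of A's
-- two shaped loops; A mutates d in place, B returns a fresh dict: return-value equivalence only.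

-- ===== PORT A =====
-- d[i] = 2 * d[i]  on an association list with unique keys: overwrite the (first) entry for i
def pvDouble (xs : List (String × Int)) (i : String) : List (String × Int) :=
  match xs with
  | [] => []
  | (a, b) :: t => if a = i then (a, 2 * b) :: t else (a, b) :: pvDouble t i

def update_wallet (d : List (String × Int)) (double_list : List String) : List (String × Int) :=
  -- first loop: for i in double_list: if i in d: d[i] = 2 * d[i]
  let d1 := double_list.foldl (fun acc i => if acc.any (fun p => p.1 = i) then pvDouble acc i else acc) d
  -- second loop: for k, v in d.items(): if k not in double_list: d[k] = d[k] - 3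
  d1.map (fun p => if p.1 ∈ double_list then p else (p.1, p.2 - 3))

-- ===== PORT B =====
def update_wallet_alt (d : List (String × Int)) (double_list : List String) : List (String × Int) :=
  let counts : PySem.Dict String Int :=
    double_list.foldl (fun c i => c.insert i (c.getD i 0 + 1)) PySem.Dict.empty
  d.map (fun p =>
    if counts.contains p.1 then (p.1, p.2 * 2 ^ (counts.getD p.1 0).toNat) else (p.1, p.2 - 3))

-- ===== PRECONDITION & SPEC =====
-- Pre_ excludes association lists with duplicate keys: those do not represent any Python
-- dict (a Python dict has unique keys), so A's behaviour on them is not defined by the source.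
def Pre_update_wallet (d : List (String × Int)) (double_list : List String) : Prop :=
  (d.map Prod.fst).Nodup
instance (d : List (String × Int)) (double_list : List String) : Decidable (Pre_update_wallet d double_list) := by unfold Pre_update_wallet; infer_instance

def pvWitness_update_wallet : (List (String × Int)) × List String :=
  ([("a", 5), ("b", 2)], ["a", "a"])

def Spec_update_wallet (d : List (String × Int)) (double_list : List String) (out : List (String × Int)) : Prop := out = update_wallet_alt d double_list
instance (d : List (String × Int)) (double_list : List String) (out : List (String × Int)) : Decidable (Spec_update_wallet d double_list out) := by unfold Spec_update_wallet; infer_instance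

-- ===== CLAIM (what is proved, stated in full; the proofs are below) =====
def Claim_equal_update_wallet : Prop := ∀ (d : List (String × Int)) (double_list : List String), Dom_update_wallet d double_list → Pre_update_wallet d double_list → Spec_update_wallet d double_list (update_wallet d double_list)

-- ===== LEMMAS AND PROOFS =====

theorem pvDouble_keys (xs : List (String × Int)) (i : String) :
    (pvDouble xs i).map Prod.fst = xs.map Prod.fst := by
  induction xs with
  | nil => rfl
  | cons p t ih =>
    obtain ⟨a, b⟩ := p
    simp only [pvDouble]
    split_ifs <;> simp [ih]

theorem pvDouble_eq_map (xs : List (String × Int)) (i : String)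
    (hnd : (xs.map Prod.fst).Nodup) (hmem : xs.any (fun p => p.1 = i)) :
    pvDouble xs i = xs.map (fun p => if p.1 = i then (p.1, 2 * p.2) else p) := by
  induction xs with
  | nil => simp at hmem
  | cons p t ih =>
    obtain ⟨a, b⟩ := p
    simp only [List.map_cons, List.nodup_cons] at hnd
    simp only [pvDouble, List.map_cons]
    by_cases ha : a = i
    · subst ha
      rw [if_pos rfl]
      -- i not a key of t, so the map is the identity on t
      have : ∀ q ∈ t, (if q.1 = a then (q.1, 2 * q.2) else q) = q := by
        intro q hq
        have : q.1 ≠ a := by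
          intro h; exact hnd.1 (h ▸ List.mem_map_of_mem hq)
        simp [this]
      simp [List.map_congr_left this]
    · simp only [if_neg ha]
      have hmem' : t.any (fun p => p.1 = i) := by
        simp only [List.any_cons] at hmem
        simpa [ha] using hmem
      simp [ih hnd.2 hmem']

theorem foldl_double_eq_map (dl : List String) (d : List (String × Int))
    (hnd : (d.map Prod.fst).Nodup) :
    dl.foldl (fun acc i => if acc.any (fun p => p.1 = i) then pvDouble acc i else acc) d
      = d.map (fun p => (p.1, 2 ^ dl.count p.1 * p.2)) := by
  induction dl generalizing d with
  | nil => simp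
  | cons i t ih =>
    simp only [List.foldl_cons]
    by_cases hmem : d.any (fun p => p.1 = i)
    · rw [if_pos hmem, pvDouble_eq_map d i hnd hmem,
        ih _ (by rw [← pvDouble_eq_map d i hnd hmem, pvDouble_keys]; exact hnd),
        List.map_map]
      apply List.map_congr_left
      intro p _
      by_cases hp : p.1 = i
      · simp [Function.comp, hp, pow_succ]
        ring
      · have hip : ¬ i = p.1 := fun h => hp h.symm
        simp [Function.comp, hp, hip]
    · rw [if_neg hmem, ih _ hnd]
      apply List.map_congr_left
      intro p hp
      have : p.1 ≠ i := by
        intro h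
        exact hmem (List.any_eq_true.mpr ⟨p, hp, by simp [h]⟩)
      have hip : ¬ i = p.1 := fun h => this h.symm
      simp [hip]

theorem counts_getD (dl : List String) (k : String) :
    ((dl.foldl (fun c i => c.insert i (c.getD i 0 + 1)) PySem.Dict.empty :
        PySem.Dict String Int).getD k 0) = dl.count k := by
  rw [PySem.Dict.foldl_insert_getD_add_one_eq_counter, PySem.Dict.getD_counter]

theorem counts_contains (dl : List String) (k : String) :
    ((dl.foldl (fun c i => c.insert i (c.getD i 0 + 1)) PySem.Dict.empty :
        PySem.Dict String Int).contains k) = decide (k ∈ dl) := by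
  rw [PySem.Dict.foldl_insert_getD_add_one_eq_counter, PySem.Dict.contains_counter]
  simp [List.contains_eq_mem]

-- ===== VERDICT (by name: the statement is the Claim_ definition above) =====
theorem update_wallet_spec : Claim_equal_update_wallet := by
  intro d dl _ hpre
  unfold Spec_update_wallet update_wallet update_wallet_alt
  rw [foldl_double_eq_map dl d hpre, List.map_map]
  apply List.map_congr_left
  intro p _
  simp only [Function.comp, counts_contains, counts_getD]
  by_cases hk : p.1 ∈ dl
  · have hc : dl.count p.1 ≠ 0 := by
      simpa [List.count_eq_zero] using hk
    simp [hk, Int.toNat_natCast, mul_comm]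
  · have : dl.count p.1 = 0 := List.count_eq_zero.mpr hk
    simp [hk, this]
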